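-- pv_equiv track=rewrite | github.com/loning/mbook-binary | src/binaryuniverse/tests/test_T9_2.py | _integrate_experience_binary
-- ===== SOURCE A (Python) =====
-- def _integrate_experience_binary(model: str, new_exp: str) -> str:
--     """整合新经验到模型"""
--     # 确保长度兼容
--     target_len = max(len(model), len(new_exp))
--
--     # 扩展到目标长度
--     model_ext = model * (target_len // len(model) + 1)
--     exp_ext = new_exp * (target_len // len(new_exp) + 1)
--
--     # 整合规则
--     integrated = []
--     for i in range(target_len):
--         m_bit = model_ext[i % len(model_ext)]
--         e_bit = exp_ext[i % len(exp_ext)]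
--
--         # 整合逻辑：保留重要信息
--         if m_bit == '1' and e_bit == '1':
--             integrated.append('0')  # 避免11
--         elif m_bit == '1' or e_bit == '1':
--             integrated.append('1')
--         else:
--             integrated.append('0')
--
--     result = ''.join(integrated)
--     return result.replace("11", "101")
-- ===== SOURCE B (Python) =====
-- def _integrate_experience_binary(model: str, new_exp: str) -> str:
--     n = max(len(model), len(new_exp))
--
--     def tiled_mask(s: str) -> int:
--         # big-endian bitmask of "char == '1'", tiled to at least n bits,
--         # then cut down to exactly the top n bits
--         k = len(s)
--         reps = n // k + 1
--         v = 0
--         for c in s: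
--             v = 2 * v + (c == '1')
--         t = 0
--         for _ in range(reps):
--             t = t * 2 ** k + v
--         return t // 2 ** (reps * k - n)
--
--     x = tiled_mask(model) ^ tiled_mask(new_exp)
--     return format(x, '0{}b'.format(n)).replace('11', '101')
-- ===== Notes on version B (the rewrite author's own statement) =====
-- stated objective: faster
-- what changed: A's per-index loop with a three-branch conditional over string-extended copies is replaced by big-integer arithmetic: each string is folded into a bitmask of its '1' positions, tiled and truncated to the target length, the two masks are XORed in one operation, and the result is formatted back to a zero-padded binary string.
import Mathlib
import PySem

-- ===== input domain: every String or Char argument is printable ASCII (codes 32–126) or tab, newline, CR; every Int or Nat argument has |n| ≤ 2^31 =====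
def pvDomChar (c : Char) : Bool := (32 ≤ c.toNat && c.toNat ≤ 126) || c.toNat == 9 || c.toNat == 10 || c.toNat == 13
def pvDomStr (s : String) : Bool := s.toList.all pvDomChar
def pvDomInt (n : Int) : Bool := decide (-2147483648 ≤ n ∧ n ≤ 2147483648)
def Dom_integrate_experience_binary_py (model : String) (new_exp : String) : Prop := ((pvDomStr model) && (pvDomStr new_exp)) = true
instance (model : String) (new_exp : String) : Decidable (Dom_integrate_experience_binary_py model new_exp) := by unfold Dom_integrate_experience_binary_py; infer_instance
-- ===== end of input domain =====

-- B replaces A's per-bit three-branch loop over extended strings by big-integer arithmetic: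
-- build one tiled bitmask per string and XOR them, then format back (measured constant-factor faster).

-- ===== PORT A =====
-- literal port of A's code; lists of chars stand for Python strings
def integrate_experience_binary_py (model : String) (new_exp : String) : String :=
  let target_len := max model.toList.length new_exp.toList.length
  -- model * (target_len // len(model) + 1)  (division by zero raises in Python: outside Pre_)
  let model_ext := (List.replicate (target_len / model.toList.length + 1) model.toList).flatten
  let exp_ext := (List.replicate (target_len / new_exp.toList.length + 1) new_exp.toList).flatten
  let integrated := (List.range target_len).foldl (fun acc i =>
    let m_bit := model_ext.getD (i % model_ext.length) ' '
    let e_bit := exp_ext.getD (i % exp_ext.length) ' '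
    if m_bit = '1' ∧ e_bit = '1' then acc ++ ['0']
    else if m_bit = '1' ∨ e_bit = '1' then acc ++ ['1']
    else acc ++ ['0']) []
  PySem.Str.replace (String.ofList integrated) "11" "101"

-- ===== PORT B =====
-- binNat x = binary digits of x, big-endian, [] for 0 (part of the hand port of format(x, '0nb'))
def binNat (x : Nat) : List Char :=
  if h : x = 0 then [] else binNat (x / 2) ++ [if x % 2 = 1 then '1' else '0']
decreasing_by exact Nat.div_lt_self (Nat.pos_of_ne_zero h) (by norm_num)

-- hand port of format(x, '0{w}b'), exact for x ≥ 0 (the only values B feeds it)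
def pyFormatBin (w : Nat) (x : Nat) : List Char :=
  let d := if binNat x = [] then ['0'] else binNat x
  List.replicate (w - d.length) '0' ++ d

-- tiled_mask of Source B (all values are nonnegative Python ints, so Nat is exact)
def tiledMask (n : Nat) (s : String) : Nat :=
  let k := s.toList.length
  let reps := n / k + 1
  let v := s.toList.foldl (fun a c => 2 * a + (if c = '1' then 1 else 0)) 0
  let t := (List.range reps).foldl (fun t _ => t * 2 ^ k + v) 0
  t / 2 ^ (reps * k - n)

def integrate_experience_binary_py_alt (model : String) (new_exp : String) : String :=
  let n := max model.toList.length new_exp.toList.length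
  let x := (tiledMask n model) ^^^ (tiledMask n new_exp)  -- Python ^ on nonneg ints
  PySem.Str.replace (String.ofList (pyFormatBin n x)) "11" "101"

-- ===== PRECONDITION & SPEC =====
-- Pre_ excludes exactly the inputs where A raises ZeroDivisionError (an empty model or an
-- empty new_exp); A returns normally on every other input.
def Pre_integrate_experience_binary_py (model : String) (new_exp : String) : Prop :=
  model ≠ "" ∧ new_exp ≠ ""
instance (model : String) (new_exp : String) : Decidable (Pre_integrate_experience_binary_py model new_exp) := by unfold Pre_integrate_experience_binary_py; infer_instance

def pvWitness_integrate_experience_binary_py : String × String := ("10", "01")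

def Spec_integrate_experience_binary_py (model : String) (new_exp : String) (out : String) : Prop := out = integrate_experience_binary_py_alt model new_exp
instance (model : String) (new_exp : String) (out : String) : Decidable (Spec_integrate_experience_binary_py model new_exp out) := by unfold Spec_integrate_experience_binary_py; infer_instance

-- ===== CLAIM (what is proved, stated in full; the proofs are below) =====
def Claim_equal_integrate_experience_binary_py : Prop := ∀ (model : String) (new_exp : String), Dom_integrate_experience_binary_py model new_exp → Pre_integrate_experience_binary_py model new_exp → Spec_integrate_experience_binary_py model new_exp (integrate_experience_binary_py model new_exp)

-- ===== LEMMAS AND PROOFS =====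

-- value of a big-endian bit list
def natOfBits (l : List Bool) : Nat := l.foldl (fun a b => 2 * a + (if b then 1 else 0)) 0

def bitChar (b : Bool) : Char := if b then '1' else '0'

lemma natOfBits_snoc (t : List Bool) (b : Bool) :
    natOfBits (t ++ [b]) = 2 * natOfBits t + (if b then 1 else 0) := by
  unfold natOfBits
  rw [List.foldl_append]
  simp

lemma natOfBits_aux (l : List Bool) (a : Nat) :
    l.foldl (fun a b => 2 * a + (if b then 1 else 0)) a = a * 2 ^ l.length + natOfBits l := by
  induction l generalizing a with
  | nil => simp [natOfBits]
  | cons b t ih =>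
    simp only [List.foldl_cons, List.length_cons, natOfBits]
    rw [ih, ih (2 * 0 + (if b then 1 else 0))]
    ring

lemma natOfBits_append (l₁ l₂ : List Bool) :
    natOfBits (l₁ ++ l₂) = natOfBits l₁ * 2 ^ l₂.length + natOfBits l₂ := by
  induction l₂ using List.reverseRecOn with
  | nil => simp [natOfBits]
  | append_singleton t b ih =>
    have h1 := natOfBits_snoc (l₁ ++ t) b
    have h2 := natOfBits_snoc t b
    calc natOfBits (l₁ ++ (t ++ [b])) = natOfBits ((l₁ ++ t) ++ [b]) := by rw [List.append_assoc]
    _ = 2 * natOfBits (l₁ ++ t) + (if b then 1 else 0) := h1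
    _ = natOfBits l₁ * 2 ^ (t ++ [b]).length + natOfBits (t ++ [b]) := by
          rw [ih, h2]; simp [pow_succ]; ring

lemma natOfBits_lt (l : List Bool) : natOfBits l < 2 ^ l.length := by
  induction l using List.reverseRecOn with
  | nil => simp [natOfBits]
  | append_singleton t b ih =>
    rw [natOfBits_snoc]
    simp only [List.length_append, List.length_cons, List.length_nil, pow_succ]
    cases b <;> simp <;> omega

lemma natOfBits_cons (b : Bool) (l : List Bool) :
    natOfBits (b :: l) = (if b then 1 else 0) * 2 ^ l.length + natOfBits l := by
  unfold natOfBits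
  rw [List.foldl_cons, natOfBits_aux]
  simp [natOfBits]

lemma natOfBits_zero_iff (l : List Bool) :
    natOfBits l = 0 ↔ l.dropWhile (fun b => !b) = [] := by
  induction l with
  | nil => simp [natOfBits]
  | cons b t ih =>
    rw [natOfBits_cons]
    cases b with
    | false => simpa using ih
    | true =>
      simp

lemma tiled_fold (l : List Bool) (r : Nat) :
    (List.range r).foldl (fun t _ => t * 2 ^ l.length + natOfBits l) 0
      = natOfBits ((List.replicate r l).flatten) := by
  induction r with
  | zero => simp [natOfBits]
  | succ r ih =>
    rw [List.range_succ, List.foldl_append, ih, List.foldl_cons, List.foldl_nil,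
        List.replicate_succ', List.flatten_append, natOfBits_append]
    simp

lemma natOfBits_div (L : List Bool) (n : Nat) (_h : n ≤ L.length) :
    natOfBits L / 2 ^ (L.length - n) = natOfBits (L.take n) := by
  have hlen : (L.drop n).length = L.length - n := by simp
  have hL : natOfBits L = natOfBits (L.take n) * 2 ^ (L.length - n) + natOfBits (L.drop n) := by
    conv_lhs => rw [← List.take_append_drop n L]
    rw [natOfBits_append, hlen]
  rw [hL, mul_comm, Nat.mul_add_div (Nat.two_pow_pos _),
      Nat.div_eq_of_lt (hlen ▸ natOfBits_lt (L.drop n)), Nat.add_zero]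

lemma xor_split (a b ra rb m : Nat) (ha : ra < 2 ^ m) (hb : rb < 2 ^ m) :
    (a * 2 ^ m + ra) ^^^ (b * 2 ^ m + rb) = (a ^^^ b) * 2 ^ m + (ra ^^^ rb) := by
  have hx : ra ^^^ rb < 2 ^ m := Nat.xor_lt_two_pow ha hb
  apply Nat.eq_of_testBit_eq
  intro j
  rw [mul_comm a, mul_comm b, mul_comm (a ^^^ b)]
  rw [Nat.testBit_xor, Nat.testBit_two_pow_mul_add _ ha, Nat.testBit_two_pow_mul_add _ hb,
      Nat.testBit_two_pow_mul_add _ hx]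
  split <;> simp [Nat.testBit_xor]

lemma natOfBits_xor (a b : List Bool) (h : a.length = b.length) :
    natOfBits a ^^^ natOfBits b = natOfBits (List.zipWith xor a b) := by
  induction a generalizing b with
  | nil =>
    cases b with
    | nil => simp [natOfBits]
    | cons _ _ => simp at h
  | cons x t ih =>
    cases b with
    | nil => simp at h
    | cons y u =>
      simp only [List.length_cons, Nat.succ_inj] at h
      have hlt_u : natOfBits u < 2 ^ t.length := by rw [h]; exact natOfBits_lt u
      rw [List.zipWith_cons_cons, natOfBits_cons, natOfBits_cons, natOfBits_cons, ← h,
          List.length_zipWith, ← h, min_self]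
      rw [xor_split _ _ _ _ _ (natOfBits_lt t) hlt_u, ih u h]
      congr 1
      cases x <;> cases y <;> simp

lemma binNat_natOfBits (l : List Bool) :
    binNat (natOfBits l) = (l.dropWhile (fun b => !b)).map bitChar := by
  induction l using List.reverseRecOn with
  | nil =>
    rw [show natOfBits [] = 0 from rfl, binNat]
    simp
  | append_singleton t b ih =>
    rw [natOfBits_snoc]
    by_cases h0 : 2 * natOfBits t + (if b then 1 else 0) = 0
    · have hb : b = false := by cases b <;> simp at h0 ⊢
      have ht : natOfBits t = 0 := by omega
      have hdw : t.dropWhile (fun b => !b) = [] := (natOfBits_zero_iff t).mp ht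
      rw [h0, binNat, dif_pos rfl, List.dropWhile_append, hdw, hb]
      simp
    · rw [binNat, dif_neg h0]
      have hdiv : (2 * natOfBits t + (if b then 1 else 0)) / 2 = natOfBits t := by
        cases b with
        | false => simp
        | true => simp; omega
      have hmod : ((2 * natOfBits t + (if b then 1 else 0)) % 2 = 1) = (b = true) := by
        cases b with
        | false => simp
        | true => simp
      rw [hdiv, ih, List.dropWhile_append]
      by_cases hdw : t.dropWhile (fun b => !b) = []
      · have ht : natOfBits t = 0 := (natOfBits_zero_iff t).mpr hdw
        have hb : b = true := by
          cases b with
          | true => rfl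
          | false => simp [ht] at h0
        subst hb
        rw [hdw, ht]
        simp [bitChar]
      · have hb2 : bitChar b = if (2 * natOfBits t + (if b then 1 else 0)) % 2 = 1 then '1' else '0' := by
          cases b <;> simp [bitChar]
        rw [if_neg (fun hc => hdw (List.isEmpty_iff.mp hc)), List.map_append, ← hb2]
        simp

lemma pyFormatBin_natOfBits (l : List Bool) (n : Nat) (hl : l.length = n) (hn : 0 < n) :
    pyFormatBin n (natOfBits l) = l.map bitChar := by
  unfold pyFormatBin
  rw [binNat_natOfBits]
  by_cases hdw : l.dropWhile (fun b => !b) = []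
  · have hall : ∀ c ∈ l, c = false := by
      intro c hc
      by_contra hcf
      have : l.dropWhile (fun b => !b) ≠ [] := by
        intro he
        have := List.dropWhile_eq_nil_iff.mp he c hc
        simp at this
        exact hcf this
      exact this hdw
    have hmap : l.map bitChar = List.replicate n '0' := by
      apply List.eq_replicate_iff.mpr
      refine ⟨by simpa using hl, ?_⟩
      intro c hc
      obtain ⟨a, ha, rfl⟩ := List.mem_map.mp hc
      rw [hall a ha]; rfl
    rw [hdw, hmap]
    norm_num
    rw [show (['0'] : List Char) = List.replicate 1 '0' from rfl,
        ← List.replicate_add]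
    congr 1
    omega
  · rw [if_neg (by simpa using hdw)]
    have hsplit : l = l.takeWhile (fun b => !b) ++ l.dropWhile (fun b => !b) :=
      (List.takeWhile_append_dropWhile).symm
    have htw : ∀ c ∈ l.takeWhile (fun b => !b), c = false := by
      intro c hc
      have := List.mem_takeWhile_imp hc
      simpa using this
    have hmap_tw : (l.takeWhile (fun b => !b)).map bitChar
        = List.replicate (l.takeWhile (fun b => !b)).length '0' := by
      apply List.eq_replicate_iff.mpr
      refine ⟨by simp, ?_⟩
      intro c hc
      obtain ⟨a, ha, rfl⟩ := List.mem_map.mp hc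
      rw [htw a ha]; rfl
    have hlen0 : (l.takeWhile (fun b => !b)).length + (l.dropWhile (fun b => !b)).length = n := by
      rw [← hl, ← List.length_append, List.takeWhile_append_dropWhile]
    have hlen : (l.takeWhile (fun b => !b)).length
        = n - ((l.dropWhile (fun b => !b)).map bitChar).length := by
      rw [List.length_map]
      omega
    conv_rhs => rw [hsplit]
    rw [List.map_append, hmap_tw, hlen]

lemma foldl_append_map {α β : Type} (l : List α) (g : α → β) (acc : List β) :
    l.foldl (fun acc i => acc ++ [g i]) acc = acc ++ l.map g := by
  induction l generalizing acc with
  | nil => simp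
  | cons x t ih => simp [ih]

lemma flatten_replicate_getElem? {α : Type} (l : List α) (r i : Nat) (h : i < r * l.length) :
    ((List.replicate r l).flatten)[i]? = l[i % l.length]? := by
  induction r generalizing i with
  | zero => simp at h
  | succ r ih =>
    rw [List.replicate_succ, List.flatten_cons, List.getElem?_append]
    by_cases hi : i < l.length
    · rw [if_pos hi, Nat.mod_eq_of_lt hi]
    · rw [if_neg hi]
      obtain ⟨j, rfl⟩ : ∃ j, i = l.length + j := ⟨i - l.length, by omega⟩
      have hj : j < r * l.length := by
        have := h
        simp [Nat.succ_mul] at this ⊢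
        omega
      rw [Nat.add_sub_cancel_left, ih j hj, Nat.add_mod_left]

lemma tiledMask_eq (n : Nat) (s : String) (_hs : s.toList ≠ []) (hn : n ≤ (n / s.toList.length + 1) * s.toList.length) :
    tiledMask n s
      = natOfBits (((List.replicate (n / s.toList.length + 1) (s.toList.map (fun c => c == '1'))).flatten).take n) := by
  have hfun : (fun (a : Nat) (c : Char) => 2 * a + if c = '1' then 1 else 0)
      = (fun (a : Nat) (c : Char) => 2 * a + if (c == '1') = true then 1 else 0) := by
    funext a c; by_cases hc : c = '1' <;> simp [hc]
  have hv : s.toList.foldl (fun a c => 2 * a + (if c = '1' then 1 else 0)) 0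
      = natOfBits (s.toList.map (fun c => c == '1')) := by
    unfold natOfBits; rw [List.foldl_map, hfun]
  have hk : (List.map (fun c => c == '1') s.toList).length = s.toList.length := by simp
  have hflat : ((List.replicate (n / (List.map (fun c => c == '1') s.toList).length + 1)
        (List.map (fun c => c == '1') s.toList)).flatten).length
      = (n / (List.map (fun c => c == '1') s.toList).length + 1)
        * (List.map (fun c => c == '1') s.toList).length := by
    simp [List.length_flatten]
  simp only [tiledMask]
  rw [hv, ← hk, tiled_fold, ← hflat, natOfBits_div]
  rw [hflat, hk]
  exact hn

-- ===== VERDICT (by name: the statement is the Claim_ definition above) =====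
theorem integrate_experience_binary_py_spec : Claim_equal_integrate_experience_binary_py := by
  intro model new_exp _hdom hpre
  unfold Spec_integrate_experience_binary_py
  obtain ⟨hm, he⟩ := hpre
  have hm' : model.toList ≠ [] := fun h => hm (String.toList_eq_nil_iff.mp h)
  have he' : new_exp.toList ≠ [] := fun h => he (String.toList_eq_nil_iff.mp h)
  have hk1 : 0 < model.toList.length := List.length_pos_iff.mpr hm'
  have hk2 : 0 < new_exp.toList.length := List.length_pos_iff.mpr he'
  have hn1 : 0 < max model.toList.length new_exp.toList.length :=
    lt_of_lt_of_le hk1 (le_max_left _ _)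
  have hr1 : max model.toList.length new_exp.toList.length
      ≤ (max model.toList.length new_exp.toList.length / model.toList.length + 1) * model.toList.length := by
    have h1 := Nat.div_add_mod (max model.toList.length new_exp.toList.length) model.toList.length
    have h2 := Nat.mod_lt (max model.toList.length new_exp.toList.length) hk1
    have h3 : (max model.toList.length new_exp.toList.length / model.toList.length + 1) * model.toList.length
        = model.toList.length * (max model.toList.length new_exp.toList.length / model.toList.length)
          + model.toList.length := by ring
    omega
  have hr2 : max model.toList.length new_exp.toList.length
      ≤ (max model.toList.length new_exp.toList.length / new_exp.toList.length + 1) * new_exp.toList.length := by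
    have h1 := Nat.div_add_mod (max model.toList.length new_exp.toList.length) new_exp.toList.length
    have h2 := Nat.mod_lt (max model.toList.length new_exp.toList.length) hk2
    have h3 : (max model.toList.length new_exp.toList.length / new_exp.toList.length + 1) * new_exp.toList.length
        = new_exp.toList.length * (max model.toList.length new_exp.toList.length / new_exp.toList.length)
          + new_exp.toList.length := by ring
    omega
  simp only [integrate_experience_binary_py, integrate_experience_binary_py_alt]
  rw [tiledMask_eq _ _ hm' hr1, tiledMask_eq _ _ he' hr2]
  have hflat1 : ((List.replicate (max model.toList.length new_exp.toList.length / model.toList.length + 1)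
        (model.toList.map (fun c => c == '1'))).flatten).length
      = (max model.toList.length new_exp.toList.length / model.toList.length + 1) * model.toList.length := by
    simp [List.length_flatten]
  have hflat2 : ((List.replicate (max model.toList.length new_exp.toList.length / new_exp.toList.length + 1)
        (new_exp.toList.map (fun c => c == '1'))).flatten).length
      = (max model.toList.length new_exp.toList.length / new_exp.toList.length + 1) * new_exp.toList.length := by
    simp [List.length_flatten]
  have hlen1 : (((List.replicate (max model.toList.length new_exp.toList.length / model.toList.length + 1)
        (model.toList.map (fun c => c == '1'))).flatten).take (max model.toList.length new_exp.toList.length)).length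
      = max model.toList.length new_exp.toList.length := by
    rw [List.length_take, hflat1]
    omega
  have hlen2 : (((List.replicate (max model.toList.length new_exp.toList.length / new_exp.toList.length + 1)
        (new_exp.toList.map (fun c => c == '1'))).flatten).take (max model.toList.length new_exp.toList.length)).length
      = max model.toList.length new_exp.toList.length := by
    rw [List.length_take, hflat2]
    omega
  rw [natOfBits_xor _ _ (hlen1.trans hlen2.symm)]
  rw [pyFormatBin_natOfBits _ _ (by rw [List.length_zipWith, hlen1, hlen2, min_self]) hn1]
  have hfold : ∀ (mext eext : List Char) (N : Nat),
      (List.range N).foldl (fun acc i =>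
        if mext.getD (i % mext.length) ' ' = '1' ∧ eext.getD (i % eext.length) ' ' = '1' then acc ++ ['0']
        else if mext.getD (i % mext.length) ' ' = '1' ∨ eext.getD (i % eext.length) ' ' = '1' then acc ++ ['1']
        else acc ++ ['0']) []
      = (List.range N).map (fun i =>
        if mext.getD (i % mext.length) ' ' = '1' ∧ eext.getD (i % eext.length) ' ' = '1' then '0'
        else if mext.getD (i % mext.length) ' ' = '1' ∨ eext.getD (i % eext.length) ' ' = '1' then '1'
        else '0') := by
    intro mext eext N
    have hfn : (fun (acc : List Char) (i : Nat) =>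
        if mext.getD (i % mext.length) ' ' = '1' ∧ eext.getD (i % eext.length) ' ' = '1' then acc ++ ['0']
        else if mext.getD (i % mext.length) ' ' = '1' ∨ eext.getD (i % eext.length) ' ' = '1' then acc ++ ['1']
        else acc ++ ['0'])
        = (fun acc i => acc ++ [if mext.getD (i % mext.length) ' ' = '1' ∧ eext.getD (i % eext.length) ' ' = '1' then '0'
        else if mext.getD (i % mext.length) ' ' = '1' ∨ eext.getD (i % eext.length) ' ' = '1' then '1'
        else '0']) := by
      funext acc i
      split_ifs <;> rfl
    rw [hfn, foldl_append_map, List.nil_append]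
  rw [hfold]
  apply congrArg (fun l => PySem.Str.replace (String.ofList l) "11" "101")
  have hlenA : ((List.replicate (max model.toList.length new_exp.toList.length / model.toList.length + 1)
      model.toList).flatten).length
      = (max model.toList.length new_exp.toList.length / model.toList.length + 1) * model.toList.length := by
    simp [List.length_flatten]
  have hlenB : ((List.replicate (max model.toList.length new_exp.toList.length / new_exp.toList.length + 1)
      new_exp.toList).flatten).length
      = (max model.toList.length new_exp.toList.length / new_exp.toList.length + 1) * new_exp.toList.length := by
    simp [List.length_flatten]
  apply List.ext_getElem?
  intro i
  by_cases hi : i < max model.toList.length new_exp.toList.length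
  · rw [List.getElem?_map, List.getElem?_map, List.getElem?_range hi, List.getElem?_zipWith]
    rw [List.getElem?_take, List.getElem?_take, if_pos hi, if_pos hi]
    rw [flatten_replicate_getElem? _ _ _ (by simpa using lt_of_lt_of_le hi hr1),
        flatten_replicate_getElem? _ _ _ (by simpa using lt_of_lt_of_le hi hr2)]
    simp only [Option.map_some]
    rw [hlenA, hlenB, Nat.mod_eq_of_lt (lt_of_lt_of_le hi hr1), Nat.mod_eq_of_lt (lt_of_lt_of_le hi hr2)]
    rw [List.getD_eq_getElem?_getD, List.getD_eq_getElem?_getD]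
    rw [flatten_replicate_getElem? _ _ _ (lt_of_lt_of_le hi hr1),
        flatten_replicate_getElem? _ _ _ (lt_of_lt_of_le hi hr2)]
    simp only [List.length_map, List.getElem?_map]
    cases hc1e : model.toList[i % model.toList.length]? with
    | none =>
      have := List.getElem?_eq_none_iff.mp hc1e
      have := Nat.mod_lt i hk1
      omega
    | some c1 =>
      cases hc2e : new_exp.toList[i % new_exp.toList.length]? with
      | none =>
        have := List.getElem?_eq_none_iff.mp hc2e
        have := Nat.mod_lt i hk2
        omega
      | some c2 =>
        simp only [Option.map_some, Option.getD_some]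
        by_cases hc1 : c1 = '1' <;> by_cases hc2 : c2 = '1' <;> simp [bitChar, hc1, hc2]
  · have hi2 := Nat.le_of_not_lt hi
    rw [List.getElem?_eq_none (by simpa using hi2),
        List.getElem?_eq_none (by rw [List.length_map, List.length_zipWith, hlen1, hlen2, min_self]; exact hi2)]
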